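-- pv_equiv track=rewrite | github.com/hiwonwon/codingtest_python | 프로그래머스/3/42895. N으로 표현/N으로 표현.py | solution
-- ===== SOURCE A (Python) =====
-- def solution(N, number):
--     answer = 0
--     s = [set() for _ in range(8)]
--     for i in range (len(s)):
--         #N을 i개 사용해서 만든 숫자 s에 삽입
--         s[i].add(int(str(N)*(i+1)))
--
--     for i in range (len(s)):
--         for j in range(i):
--             for op1 in s[j]:
--                 for op2 in s[i - j - 1]:
--                     s[i].add(op1+op2)
--                     s[i].add(op1-op2)
--                     s[i].add(op1*op2)
--                     if op2 !=0:
--                         s[i].add(op1//op2)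
--         if number in s[i]:
--             answer = (i+1)
--             #최솟값 구하므로 이후의 값 구하지 않고 break
--             break
--         else:
--             answer = -1
--
--     return answer
-- ===== SOURCE B (Python) =====
-- def solution(N, number):
--     def tables(k):
--         # list of the sets reachable with exactly 1..k copies of N
--         if k == 0:
--             return []
--         prev = tables(k - 1)
--         vals = {int(str(N) * k)}
--         for split in range(1, k):
--             for a in prev[split - 1]:
--                 for b in prev[k - split - 1]:
--                     for c in [a + b, a - b, a * b] + ([a // b] if b != 0 else []):
--                         vals.add(c)
--         return prev + [vals]
--
--     sets = tables(8)
--     for k in range(1, 9):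
--         if number in sets[k - 1]:
--             return k
--     return -1
-- ===== Notes on version B (the rewrite author's own statement) =====
-- stated objective: alternative
-- what changed: Replaces A's preallocated 8-slot array (base-filling index loop, then a triple nested index loop mutating s[i] with a break/answer flag) by a recursive tables(k) builder returning the list of reachable-sets for 1..k copies (base created on demand, the four candidate results collected as a list), followed by a separate search loop over k=1..8.
import Mathlib
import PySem

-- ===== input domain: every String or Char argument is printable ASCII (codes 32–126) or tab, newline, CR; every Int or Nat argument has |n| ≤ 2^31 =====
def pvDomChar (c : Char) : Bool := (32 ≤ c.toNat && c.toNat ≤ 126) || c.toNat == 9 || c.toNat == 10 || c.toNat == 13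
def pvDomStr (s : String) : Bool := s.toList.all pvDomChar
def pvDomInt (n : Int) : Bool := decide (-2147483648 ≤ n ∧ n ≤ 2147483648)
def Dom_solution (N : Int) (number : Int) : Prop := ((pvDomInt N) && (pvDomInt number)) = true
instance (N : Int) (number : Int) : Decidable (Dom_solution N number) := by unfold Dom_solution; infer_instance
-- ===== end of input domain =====

-- B replaces A's preallocated 8-slot array with index loops and a break flag by a recursive
-- tables(k) builder plus a separate search loop (objective: alternative decomposition).

-- Python's 'set' here: the insertion-order element list (exactly PySem.Set's value) plus the
-- hash index CPython maintains, so the ports evaluate at set speed; add/in behave exactly like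
-- PvPySet.add/contains (first-insertion order, no duplicates). Used by both ports.
structure PvPySet where
  list : List Int
  idx : Std.HashSet Int

def PvPySet.empty : PvPySet := ⟨[], ∅⟩

def PvPySet.add (s : PvPySet) (x : Int) : PvPySet :=
  if s.idx.contains x then s else ⟨s.list ++ [x], s.idx.insert x⟩

def PvPySet.contains (s : PvPySet) (x : Int) : Bool := s.idx.contains x

-- ===== PORT A =====
-- int(str(N)*(i+1)); Python raises ValueError when N < 0 (the repeated string "-3-3" is not an int),
-- those inputs are excluded by Pre_solution, so the .getD 0 default is never the claimed value.
def pvRepA (N : Int) (k : Int) : Int :=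
  (PySem.Int.ofChars? (PySem.List.pyRepeat (PySem.Int.toChars N) k)).getD 0

-- the four s[i].add(...) statements of A's innermost block
def pvAddOpsA (acc : PvPySet) (op1 op2 : Int) : PvPySet :=
  let a1 := PvPySet.add acc (op1 + op2)
  let a2 := PvPySet.add a1 (op1 - op2)
  let a3 := PvPySet.add a2 (op1 * op2)
  if op2 ≠ 0 then PvPySet.add a3 (PySem.Int.floordiv op1 op2) else a3

-- the 'for j in range(i): for op1 in s[j]: for op2 in s[i-j-1]: ...' block, run on s[i]
def pvCombineA (s : List (PvPySet)) (i : Nat) : PvPySet :=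
  (List.range i).foldl (fun acc j =>
      (s.getD j PvPySet.empty).list.foldl (fun acc op1 =>
        (s.getD (i - j - 1) PvPySet.empty).list.foldl (fun acc op2 =>
          pvAddOpsA acc op1 op2) acc) acc)
    (s.getD i PvPySet.empty)

-- the second 'for i in range(len(s))' loop with its break/answer variable
def pvLoopA (number : Int) (s : List (PvPySet)) (i : Nat) : Int :=
  if i < 8 then
    if PvPySet.contains ((s.set i (pvCombineA s i)).getD i PvPySet.empty) number then
      (i : Int) + 1
    else pvLoopA number (s.set i (pvCombineA s i)) (i + 1)
  else -1
termination_by 8 - i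

def solution (N : Int) (number : Int) : Int :=
  let s0 : List (PvPySet) := List.replicate 8 PvPySet.empty
  let s1 := (List.range 8).foldl
    (fun s i => s.set i (PvPySet.add (s.getD i PvPySet.empty) (pvRepA N ((i : Int) + 1)))) s0
  pvLoopA number s1 0

-- ===== PORT B =====
def pvRepB (N : Int) (k : Int) : Int :=
  (PySem.Int.ofChars? (PySem.List.pyRepeat (PySem.Int.toChars N) k)).getD 0

-- the candidate list [a+b, a-b, a*b] + ([a//b] if b != 0 else [])
def pvCandsB (a b : Int) : List Int :=
  [a + b, a - b, a * b] ++ (if b ≠ 0 then [PySem.Int.floordiv a b] else [])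

-- body of tables(k): vals = {int(str(N)*k)} then the split loop over prev
def pvValsB (N : Int) (prev : List (PvPySet)) (k : Nat) : PvPySet :=
  (List.range' 1 (k - 1)).foldl (fun vals split =>
      (prev.getD (split - 1) PvPySet.empty).list.foldl (fun vals a =>
        (prev.getD (k - split - 1) PvPySet.empty).list.foldl (fun vals b =>
          (pvCandsB a b).foldl PvPySet.add vals) vals) vals)
    (PvPySet.add PvPySet.empty (pvRepB N (k : Int)))

def pvTablesB (N : Int) : Nat → List (PvPySet)
  | 0 => []
  | k + 1 =>
    let prev := pvTablesB N k
    prev ++ [pvValsB N prev (k + 1)]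

-- 'for k in range(1, 9): if number in sets[k-1]: return k' and the fallthrough -1
def pvSearchB (number : Int) (sets : List (PvPySet)) (k : Nat) : Int :=
  if k < 9 then
    if PvPySet.contains (sets.getD (k - 1) PvPySet.empty) number then (k : Int)
    else pvSearchB number sets (k + 1)
  else -1
termination_by 9 - k

def solution_alt (N : Int) (number : Int) : Int :=
  pvSearchB number (pvTablesB N 8) 1

-- ===== PRECONDITION & SPEC =====
-- For N < 0 the Python A raises ValueError at int(str(N)*2) ("-3-3"), so A returns on no excluded input.
def Pre_solution (N : Int) (number : Int) : Prop := 0 ≤ N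
instance (N : Int) (number : Int) : Decidable (Pre_solution N number) := by unfold Pre_solution; infer_instance
def pvWitness_solution : Int × Int := (5, 12)

def Spec_solution (N : Int) (number : Int) (out : Int) : Prop := out = solution_alt N number
instance (N : Int) (number : Int) (out : Int) : Decidable (Spec_solution N number out) := by unfold Spec_solution; infer_instance

-- ===== CLAIM (what is proved, stated in full; the proofs are below) =====
def Claim_equal_solution : Prop := ∀ (N : Int) (number : Int), Dom_solution N number → Pre_solution N number → Spec_solution N number (solution N number)

-- ===== LEMMAS AND PROOFS =====

-- A's array state after the i-th step of the second loop: the first i slots hold the finished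
-- reachable-sets, the rest still hold the singleton bases planted by A's first loop.
def pvMixed (N : Int) (i : Nat) : List (PvPySet) :=
  pvTablesB N i ++ (List.range' i (8 - i)).map (fun (m : Nat) => PvPySet.add PvPySet.empty (pvRepB N ((m : Int) + 1)))

lemma pvTablesB_length (N : Int) (k : Nat) : (pvTablesB N k).length = k := by
  induction k with
  | zero => rfl
  | succ k ih => simp [pvTablesB, ih]

lemma pvTablesB_getD (N : Int) {j k : Nat} (h : j < k) :
    (pvTablesB N k).getD j PvPySet.empty = pvValsB N (pvTablesB N j) (j + 1) := by
  induction k with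
  | zero => omega
  | succ k ih =>
    rcases Nat.lt_succ_iff_lt_or_eq.mp h with h' | h'
    · rw [pvTablesB]
      rw [List.getD_append _ _ _ _ (by simp [pvTablesB_length, h'])]
      exact ih h'
    · subst h'
      rw [pvTablesB]
      rw [List.getD_append_right _ _ _ _ (by simp [pvTablesB_length])]
      simp [pvTablesB_length]

lemma pvCandsB_foldl (acc : PvPySet) (a b : Int) :
    (pvCandsB a b).foldl PvPySet.add acc = pvAddOpsA acc a b := by
  by_cases hb : b = 0 <;> simp [pvCandsB, pvAddOpsA, hb]

lemma pvCombine_eq (N : Int) {i : Nat} (hi : i < 8) :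
    pvCombineA (pvMixed N i) i = pvValsB N (pvTablesB N i) (i + 1) := by
  have hlen := pvTablesB_length N i
  have hinit : (pvMixed N i).getD i PvPySet.empty
      = PvPySet.add PvPySet.empty (pvRepB N ((i : Int) + 1)) := by
    rw [pvMixed, List.getD_append_right _ _ _ _ (by simp [hlen])]
    have h8 : 8 - i = (8 - (i + 1)) + 1 := by omega
    rw [h8, List.range'_succ]
    simp [hlen]
  unfold pvCombineA pvValsB
  rw [hinit]
  simp only [Nat.add_sub_cancel]
  rw [List.range'_eq_map_range, List.foldl_map]
  apply PySem.List.foldl_congr_mem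
  intro acc j hj
  have hj' : j < i := List.mem_range.mp hj
  have e1 : 1 + j - 1 = j := by omega
  have e2 : (i + 1) - (1 + j) - 1 = i - j - 1 := by omega
  have gd : ∀ m, m < i → (pvMixed N i).getD m PvPySet.empty
      = pvValsB N (pvTablesB N m) (m + 1) := by
    intro m hm
    rw [pvMixed, List.getD_append _ _ _ _ (by simpa [pvTablesB_length] using hm)]
    exact pvTablesB_getD N hm
  rw [e1, e2, gd j hj', gd (i - j - 1) (by omega),
      pvTablesB_getD N (show j < i from hj'), pvTablesB_getD N (show i - j - 1 < i by omega)]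
  simp only [pvCandsB_foldl]

lemma pvMixed_set (N : Int) {i : Nat} (hi : i < 8) :
    (pvMixed N i).set i (pvValsB N (pvTablesB N i) (i + 1)) = pvMixed N (i + 1) := by
  have hlen := pvTablesB_length N i
  have h8 : 8 - i = (8 - (i + 1)) + 1 := by omega
  rw [pvMixed, List.set_append_right _ _ (by simp [hlen]), pvMixed, pvTablesB,
      List.append_assoc]
  congr 1
  rw [hlen, Nat.sub_self, h8, List.range'_succ, List.map_cons, List.set_cons_zero]
  rfl

lemma pvLoop_eq (N number : Int) :
    ∀ d i, i + d = 8 → pvLoopA number (pvMixed N i) i = pvSearchB number (pvTablesB N 8) (i + 1) := by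
  intro d
  induction d with
  | zero =>
    intro i hi
    have : i = 8 := by omega
    subst this
    rw [pvLoopA, pvSearchB]
    norm_num
  | succ d ih =>
    intro i hi
    have hi8 : i < 8 := by omega
    rw [pvLoopA, pvSearchB]
    rw [if_pos hi8, if_pos (show i + 1 < 9 by omega)]
    rw [pvCombine_eq N hi8, pvMixed_set N hi8]
    have hget : (pvMixed N (i + 1)).getD i PvPySet.empty
        = pvValsB N (pvTablesB N i) (i + 1) := by
      rw [pvMixed, List.getD_append _ _ _ _ (by simp [pvTablesB_length])]
      exact pvTablesB_getD N (Nat.lt_succ_self i)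
    have hget8 : (pvTablesB N 8).getD ((i + 1) - 1) PvPySet.empty
        = pvValsB N (pvTablesB N i) (i + 1) := by
      have : (i + 1) - 1 = i := by omega
      rw [this]
      exact pvTablesB_getD N hi8
    rw [hget, hget8]
    by_cases hc : PvPySet.contains (pvValsB N (pvTablesB N i) (i + 1)) number = true
    · rw [if_pos hc, if_pos hc]
      push_cast
      ring
    · rw [if_neg hc, if_neg hc]
      exact ih (i + 1) (by omega)

-- ===== VERDICT (by name: the statement is the Claim_ definition above) =====
theorem solution_spec : Claim_equal_solution := by
  intro N number _ _
  show solution N number = solution_alt N number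
  show pvLoopA number (pvMixed N 0) 0 = pvSearchB number (pvTablesB N 8) (0 + 1)
  exact pvLoop_eq N number 8 0 rfl
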